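-- pv_equiv track=rewrite | github.com/BullBearBroker/BullBearBroker | backend/services/market_service.py | _combine_ranked_lists
-- ===== SOURCE A (Python) =====
-- from collections.abc import Sequence
-- from typing import Any
--
-- def _combine_ranked_lists(
--     sources: Sequence[list[dict[str, Any]]], limit: int
-- ) -> list[dict[str, Any]]:
--     combined: list[dict[str, Any]] = []
--     indices = [0] * len(sources)
--     while len(combined) < limit:
--         progressed = False
--         for idx, items in enumerate(sources):
--             pointer = indices[idx]
--             if pointer < len(items):
--                 combined.append(items[pointer])
--                 indices[idx] += 1
--                 progressed = True
--                 if len(combined) >= limit: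
--                     break
--         if not progressed:
--             break
--     return combined
-- ===== SOURCE B (Python) =====
-- def _combine_ranked_lists(sources, limit):
--     if limit <= 0:
--         return []
--     tagged = [(rank, item) for items in sources for rank, item in enumerate(items)]
--     tagged.sort(key=lambda t: t[0])  # stable: within a rank, source order is preserved
--     return [item for _, item in tagged[:limit]]
-- ===== Notes on version B (the rewrite author's own statement) =====
-- stated objective: alternative
-- what changed: Replaces A's round-robin pointer scan (index array, progressed flag, nested break) by decorate-sort-undecorate: tag every item with its rank within its source, stable-sort the flattened tagged list by rank, and truncate to the limit.
import Mathlib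
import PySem

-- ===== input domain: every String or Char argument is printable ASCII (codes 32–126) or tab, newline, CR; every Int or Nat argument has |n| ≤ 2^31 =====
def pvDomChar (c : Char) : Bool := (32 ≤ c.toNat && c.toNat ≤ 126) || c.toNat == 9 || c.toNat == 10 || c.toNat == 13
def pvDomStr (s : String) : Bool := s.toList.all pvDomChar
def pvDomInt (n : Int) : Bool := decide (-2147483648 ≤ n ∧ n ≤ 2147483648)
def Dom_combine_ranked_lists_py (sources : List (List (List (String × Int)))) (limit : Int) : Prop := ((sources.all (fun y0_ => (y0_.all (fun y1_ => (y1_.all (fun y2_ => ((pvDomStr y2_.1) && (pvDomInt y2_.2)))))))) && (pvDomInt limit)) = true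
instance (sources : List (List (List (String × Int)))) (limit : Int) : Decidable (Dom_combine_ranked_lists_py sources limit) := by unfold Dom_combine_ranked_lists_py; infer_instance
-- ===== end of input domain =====

-- B replaces A's round-robin pointer scan (index array, progressed flag, nested break) by
-- decorate-sort-undecorate: tag each item with its rank, stable-sort the flattened tagged
-- list by rank, truncate to the limit (objective: alternative).

abbrev PvR : Type := List (String × Int)

-- ===== PORT A =====
-- `enumerate(sources)` starting at k
def pvEnum {α : Type} : Nat → List α → List (Nat × α)
  | _, [] => []
  | k, x :: xs => (k, x) :: pvEnum (k + 1) xs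

-- the `for idx, items in enumerate(sources)` body; returns (combined, indices, progressed, broke)
def pvInner (limit : Int) : List (Nat × List PvR) → List PvR → List Nat → Bool →
    (List PvR × List Nat × Bool × Bool)
  | [], combined, indices, progressed => (combined, indices, progressed, false)
  | (idx, items) :: rest, combined, indices, progressed =>
    let pointer := indices.getD idx 0
    if pointer < items.length then
      let combined' := combined ++ [items.getD pointer []]
      let indices' := indices.set idx (pointer + 1)
      if limit ≤ (combined'.length : Int) then (combined', indices', true, true)
      else pvInner limit rest combined' indices' true
    else pvInner limit rest combined indices progressed

-- the `while len(combined) < limit` loop (fuel `limit.toNat + 2` is enough: each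
-- continuing iteration strictly grows `combined`, as the equivalence proof shows)
def pvOuter (sources : List (List PvR)) (limit : Int) : Nat → List PvR → List Nat → List PvR
  | 0, combined, _ => combined
  | fuel + 1, combined, indices =>
    if (combined.length : Int) < limit then
      let res := pvInner limit (pvEnum 0 sources) combined indices false
      if !res.2.2.1 then res.1
      else pvOuter sources limit fuel res.1 res.2.1
    else combined

def combine_ranked_lists_py (sources : List (List (List (String × Int)))) (limit : Int) : List (List (String × Int)) :=
  pvOuter sources limit (limit.toNat + 2) [] (List.replicate sources.length 0)

-- ===== PORT B =====
def combine_ranked_lists_py_alt (sources : List (List (List (String × Int)))) (limit : Int) : List (List (String × Int)) :=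
  if limit ≤ 0 then []
  else
    -- tagged = [(rank, item) for items in sources for rank, item in enumerate(items)];
    -- tagged.sort(key=lambda t: t[0])  (stable);  [item for _, item in tagged[:limit]]
    -- (here 0 < limit, so the slice tagged[:limit] is a take)
    ((PySem.List.sorted (sources.flatMap (fun items => PySem.List.enumerate items))
        (fun t => t.1) false).take limit.toNat).map (fun t => t.2)

-- ===== PRECONDITION & SPEC =====
def Spec_combine_ranked_lists_py (sources : List (List (List (String × Int)))) (limit : Int) (out : List (List (String × Int))) : Prop := out = combine_ranked_lists_py_alt sources limit
instance (sources : List (List (List (String × Int)))) (limit : Int) (out : List (List (String × Int))) : Decidable (Spec_combine_ranked_lists_py sources limit out) := by unfold Spec_combine_ranked_lists_py; infer_instance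

-- ===== CLAIM (what is proved, stated in full; the proofs are below) =====
def Claim_equal_combine_ranked_lists_py : Prop := ∀ (sources : List (List (List (String × Int)))) (limit : Int), Dom_combine_ranked_lists_py sources limit → Spec_combine_ranked_lists_py sources limit (combine_ranked_lists_py sources limit)

-- ===== LEMMAS AND PROOFS =====

-- round r of the merge: the item at rank r of each source that still has one
def pvRow (sources : List (List PvR)) (r : Nat) : List PvR := sources.filterMap (fun s => s[r]?)

def pvMax (sources : List (List PvR)) : Nat := (sources.map List.length).foldr max 0

-- everything from round r on, in round-major order
def pvFlat (sources : List (List PvR)) (r : Nat) : List PvR :=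
  (List.range' r (pvMax sources - r)).flatMap (pvRow sources)

-- the indices array mid-round: first k sources already at rank r+1, the rest at rank r
def pvMix (sources : List (List PvR)) (k r : Nat) : List Nat :=
  (sources.take k).map (fun s => min (r + 1) s.length) ++ (sources.drop k).map (fun s => min r s.length)

lemma pv_set_append {α : Type} (A B : List α) (b v : α) :
    (A ++ b :: B).set A.length v = A ++ v :: B := by
  induction A with
  | nil => simp
  | cons a A ih => simp [List.set, ih]

lemma pv_getD_append {α : Type} (A B : List α) (d : α) :
    (A ++ B).getD A.length d = B.getD 0 d := by
  induction A with
  | nil => simp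
  | cons a A ih => simpa using ih

lemma pv_mix_len (sources : List (List PvR)) (k r : Nat) (hk : k ≤ sources.length) :
    ((sources.take k).map (fun s => min (r + 1) s.length)).length = k := by
  simp [List.length_take, Nat.min_eq_left hk]

lemma pv_mix_getD (sources : List (List PvR)) (k r : Nat) (s : List PvR) (ss' : List (List PvR))
    (hdrop : sources.drop k = s :: ss') :
    (pvMix sources k r).getD k 0 = min r s.length := by
  have hk : k ≤ sources.length := by
    by_contra h
    rw [List.drop_eq_nil_of_le (by omega : sources.length ≤ k)] at hdrop
    simp at hdrop
  have := pv_getD_append ((sources.take k).map (fun s => min (r + 1) s.length))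
    ((sources.drop k).map (fun s => min r s.length)) 0
  rw [pv_mix_len sources k r hk] at this
  rw [pvMix, this, hdrop]
  simp

lemma pv_drop_succ (sources : List (List PvR)) (k : Nat) (s : List PvR) (ss' : List (List PvR))
    (hdrop : sources.drop k = s :: ss') : sources.drop (k + 1) = ss' := by
  have : sources.drop (k + 1) = (sources.drop k).drop 1 := by
    rw [List.drop_drop]
  rw [this, hdrop]
  simp

lemma pv_take_succ (sources : List (List PvR)) (k : Nat) (s : List PvR) (ss' : List (List PvR))
    (hdrop : sources.drop k = s :: ss') : sources.take (k + 1) = sources.take k ++ [s] := by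
  have hget : sources[k]? = some s := by
    have h0 : (sources.drop k)[0]? = some s := by rw [hdrop]; rfl
    rw [List.getElem?_drop] at h0
    simpa using h0
  rw [List.take_add_one, hget]
  rfl

lemma pv_mix_set (sources : List (List PvR)) (k r : Nat) (s : List PvR) (ss' : List (List PvR))
    (hdrop : sources.drop k = s :: ss') (hr : r < s.length) :
    (pvMix sources k r).set k (r + 1) = pvMix sources (k + 1) r := by
  have hk : k ≤ sources.length := by
    by_contra h
    rw [List.drop_eq_nil_of_le (by omega : sources.length ≤ k)] at hdrop
    simp at hdrop
  have h1 : (pvMix sources k r).set k (r + 1)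
      = (sources.take k).map (fun s => min (r + 1) s.length) ++ (r + 1) :: ss'.map (fun s => min r s.length) := by
    rw [pvMix, hdrop]
    have := pv_set_append ((sources.take k).map (fun s => min (r + 1) s.length))
      (ss'.map (fun s => min r s.length)) (min r s.length) (r + 1)
    rw [pv_mix_len sources k r hk] at this
    simpa using this
  rw [h1, pvMix, pv_take_succ sources k s ss' hdrop, pv_drop_succ sources k s ss' hdrop]
  simp [Nat.min_eq_left hr]

lemma pv_mix_skip (sources : List (List PvR)) (k r : Nat) (s : List PvR) (ss' : List (List PvR))
    (hdrop : sources.drop k = s :: ss') (hr : s.length ≤ r) :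
    pvMix sources k r = pvMix sources (k + 1) r := by
  rw [pvMix, pvMix, hdrop, pv_take_succ sources k s ss' hdrop, pv_drop_succ sources k s ss' hdrop]
  simp [Nat.min_eq_right hr, Nat.min_eq_right (Nat.le_succ_of_le hr)]

lemma pv_mix_zero (sources : List (List PvR)) (r : Nat) :
    pvMix sources 0 r = sources.map (fun s => min r s.length) := by
  simp [pvMix]

lemma pv_inner_nb (sources : List (List PvR)) (limit : Int) (r : Nat) :
    ∀ (ss : List (List PvR)) (k : Nat) (c : List PvR) (p : Bool),
      sources.drop k = ss →
      ((c.length : Int) + ((ss.filterMap (fun s => s[r]?)).length : Int) < limit) →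
      pvInner limit (pvEnum k ss) c (pvMix sources k r) p =
        (c ++ ss.filterMap (fun s => s[r]?),
         sources.map (fun s => min (r + 1) s.length),
         p || !(ss.filterMap (fun s => s[r]?)).isEmpty,
         false) := by
  intro ss
  induction ss with
  | nil =>
    intro k c p hdrop _
    have hk : sources.length ≤ k := by
      by_contra h
      have := List.drop_eq_nil_iff.mp hdrop
      omega
    have htake : sources.take k = sources := List.take_of_length_le hk
    simp [pvEnum, pvInner, pvMix, List.drop_eq_nil_of_le hk, htake]
  | cons s ss' ih =>
    intro k c p hdrop hnb
    by_cases hr : r < s.length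
    · -- in-range source: append items[r]
      have hfm : (s :: ss').filterMap (fun s => s[r]?) = s[r] :: ss'.filterMap (fun s => s[r]?) := by
        simp [List.filterMap_cons, List.getElem?_eq_getElem hr]
      have hptr : (pvMix sources k r).getD k 0 = r := by
        rw [pv_mix_getD sources k r s ss' hdrop, Nat.min_eq_left (le_of_lt hr)]
      have hlen : ¬ (limit ≤ ((c ++ [s.getD r []]).length : Int)) := by
        rw [hfm] at hnb
        simp at hnb ⊢
        omega
      have hrec := ih (k + 1) (c ++ [s.getD r []]) true (pv_drop_succ sources k s ss' hdrop)
        (by rw [hfm] at hnb; simp at hnb ⊢; omega)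
      rw [hfm]
      simp only [pvEnum, pvInner, hptr]
      rw [if_pos hr, if_neg hlen, pv_mix_set sources k r s ss' hdrop hr, hrec]
      simp [List.getD_eq_getElem s [] hr, List.getElem?_eq_getElem hr]
    · -- exhausted source: skip
      have hfm : (s :: ss').filterMap (fun s => s[r]?) = ss'.filterMap (fun s => s[r]?) := by
        simp [List.filterMap_cons, List.getElem?_eq_none (Nat.le_of_not_lt hr)]
      have hptr : (pvMix sources k r).getD k 0 = s.length := by
        rw [pv_mix_getD sources k r s ss' hdrop, Nat.min_eq_right (Nat.le_of_not_lt hr)]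
      have hrec := ih (k + 1) c p (pv_drop_succ sources k s ss' hdrop)
        (by rw [hfm] at hnb; exact hnb)
      rw [hfm]
      simp only [pvEnum, pvInner, hptr]
      rw [if_neg (lt_irrefl s.length), pv_mix_skip sources k r s ss' hdrop (Nat.le_of_not_lt hr)]
      exact hrec

lemma pv_inner_br (sources : List (List PvR)) (limit : Int) (r : Nat) :
    ∀ (ss : List (List PvR)) (k : Nat) (c : List PvR) (p : Bool),
      sources.drop k = ss →
      ((c.length : Int) < limit) →
      (limit ≤ (c.length : Int) + ((ss.filterMap (fun s => s[r]?)).length : Int)) →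
      ∃ ind', pvInner limit (pvEnum k ss) c (pvMix sources k r) p =
        (c ++ (ss.filterMap (fun s => s[r]?)).take (limit.toNat - c.length), ind', true, true) := by
  intro ss
  induction ss with
  | nil =>
    intro k c p _ hc hbr
    simp at hbr
    omega
  | cons s ss' ih =>
    intro k c p hdrop hc hbr
    by_cases hr : r < s.length
    · have hfm : (s :: ss').filterMap (fun s => s[r]?) = s[r] :: ss'.filterMap (fun s => s[r]?) := by
        simp [List.filterMap_cons, List.getElem?_eq_getElem hr]
      have hptr : (pvMix sources k r).getD k 0 = r := by
        rw [pv_mix_getD sources k r s ss' hdrop, Nat.min_eq_left (le_of_lt hr)]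
      by_cases hstop : limit ≤ ((c ++ [s.getD r []]).length : Int)
      · -- appended item reaches the limit: break
        refine ⟨(pvMix sources k r).set k (r + 1), ?_⟩
        have htk : limit.toNat - c.length = 1 := by
          simp at hstop
          omega
        rw [hfm, htk]
        simp only [pvEnum, pvInner, hptr]
        rw [if_pos hr, if_pos hstop]
        simp [List.getD_eq_getElem s [] hr, List.getElem?_eq_getElem hr]
      · -- keep scanning this round
        have hrec := ih (k + 1) (c ++ [s.getD r []]) true (pv_drop_succ sources k s ss' hdrop)
          (by simp at hstop ⊢; omega)
          (by rw [hfm] at hbr; simp at hbr ⊢; omega)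
        obtain ⟨ind', hrec⟩ := hrec
        refine ⟨ind', ?_⟩
        have htk : limit.toNat - c.length = (limit.toNat - (c.length + 1)) + 1 := by
          simp at hstop
          omega
        rw [hfm, htk]
        simp only [pvEnum, pvInner, hptr]
        rw [if_pos hr, if_neg hstop, pv_mix_set sources k r s ss' hdrop hr, hrec]
        simp [List.getD_eq_getElem s [] hr, List.getElem?_eq_getElem hr, List.take_succ_cons]
    · have hfm : (s :: ss').filterMap (fun s => s[r]?) = ss'.filterMap (fun s => s[r]?) := by
        simp [List.filterMap_cons, List.getElem?_eq_none (Nat.le_of_not_lt hr)]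
      have hptr : (pvMix sources k r).getD k 0 = s.length := by
        rw [pv_mix_getD sources k r s ss' hdrop, Nat.min_eq_right (Nat.le_of_not_lt hr)]
      have hrec := ih (k + 1) c p (pv_drop_succ sources k s ss' hdrop) hc
        (by rw [hfm] at hbr; exact hbr)
      obtain ⟨ind', hrec⟩ := hrec
      refine ⟨ind', ?_⟩
      rw [hfm]
      simp only [pvEnum, pvInner, hptr]
      rw [if_neg (lt_irrefl s.length), pv_mix_skip sources k r s ss' hdrop (Nat.le_of_not_lt hr)]
      exact hrec

lemma pv_outer_stop (sources : List (List PvR)) (limit : Int) (f : Nat) (c : List PvR)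
    (ind : List Nat) (hf : 1 ≤ f) (hc : limit ≤ (c.length : Int)) :
    pvOuter sources limit f c ind = c := by
  cases f with
  | zero => omega
  | succ f => simp [pvOuter, not_lt.mpr hc]

lemma pv_le_max (sources : List (List PvR)) (s : List PvR) :
    s ∈ sources → s.length ≤ pvMax sources := by
  induction sources with
  | nil => intro hs; cases hs
  | cons a l ih =>
    intro hs
    rcases List.mem_cons.mp hs with h | h
    · subst h
      simp [pvMax]
    · have := ih h
      simp [pvMax] at this ⊢
      omega

lemma pv_max_le (sources : List (List PvR)) (r : Nat) (h : ∀ s ∈ sources, s.length ≤ r) :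
    pvMax sources ≤ r := by
  induction sources with
  | nil => simp [pvMax]
  | cons a l ih =>
    simp [pvMax] at ih ⊢
    exact ⟨h a (by simp), ih (fun s hs => h s (by simp [hs]))⟩

lemma pv_flat_nil (sources : List (List PvR)) (r : Nat) (h : pvRow sources r = []) :
    pvFlat sources r = [] := by
  have hall : ∀ s ∈ sources, s.length ≤ r := by
    intro s hs
    have := List.filterMap_eq_nil_iff.mp h s hs
    exact List.getElem?_eq_none_iff.mp this
  have : pvMax sources - r = 0 := by
    have := pv_max_le sources r hall
    omega
  simp [pvFlat, this]

lemma pv_flat_cons (sources : List (List PvR)) (r : Nat) (h : pvRow sources r ≠ []) :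
    pvFlat sources r = pvRow sources r ++ pvFlat sources (r + 1) := by
  have hex : ∃ s ∈ sources, r < s.length := by
    by_contra hno
    push_neg at hno
    exact h (List.filterMap_eq_nil_iff.mpr
      (fun s hs => List.getElem?_eq_none_iff.mpr (hno s hs)))
  obtain ⟨s, hs, hr⟩ := hex
  have hlt : r < pvMax sources := lt_of_lt_of_le hr (pv_le_max sources s hs)
  have hm : pvMax sources - r = (pvMax sources - (r + 1)) + 1 := by omega
  rw [pvFlat, hm, List.range'_succ]
  simp [pvFlat, List.flatMap_cons]

lemma pv_outer_spec (sources : List (List PvR)) (limit : Int) :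
    ∀ (fuel : Nat) (r : Nat) (c : List PvR),
      ((c.length : Int) < limit) →
      (limit.toNat - c.length + 2 ≤ fuel) →
      pvOuter sources limit fuel c (sources.map (fun s => min r s.length)) =
        c ++ (pvFlat sources r).take (limit.toNat - c.length) := by
  intro fuel
  induction fuel with
  | zero => intro r c _ hf; omega
  | succ fuel ih =>
    intro r c hc hf
    have hL : (limit.toNat : Int) = limit := by omega
    have hcL : c.length < limit.toNat := by omega
    by_cases hbr : (c.length : Int) + ((pvRow sources r).length : Int) < limit
    · -- no break in this round
      have hrow := pv_inner_nb sources limit r sources 0 c false rfl (by simpa [pvRow] using hbr)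
      rw [← pv_mix_zero sources r]
      by_cases hemp : pvRow sources r = []
      · have hfl : pvFlat sources r = [] := pv_flat_nil sources r hemp
        have hemp' : List.filterMap (fun s => s[r]?) sources = [] := by
          simpa [pvRow] using hemp
        rw [pvOuter]
        simp only [if_pos hc, hrow]
        simp [hfl, hemp']
      · have hlen1 : 1 ≤ (pvRow sources r).length := by
          cases hx : pvRow sources r with
          | nil => exact absurd hx hemp
          | cons a l => simp [hx]
        have hrec := ih (r + 1) (c ++ pvRow sources r)
          (by rw [List.length_append]; push_cast; omega)
          (by rw [List.length_append]; omega)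
        rw [pvOuter]
        simp only [if_pos hc, hrow]
        have hprog : (false || !(sources.filterMap (fun s => s[r]?)).isEmpty) = true := by
          simp [pvRow] at hemp
          simp [List.isEmpty_iff, hemp]
        simp only [hprog, Bool.not_true]
        simp only [pvRow] at hrec
        rw [hrec]
        rw [pv_flat_cons sources r hemp]
        rw [List.take_append]
        have htk : (pvRow sources r).take (limit.toNat - c.length) = pvRow sources r :=
          List.take_of_length_le (by omega)
        rw [htk]
        simp [pvRow]
        omega
    · -- this round reaches the limit and breaks
      rw [not_lt] at hbr
      obtain ⟨ind', hrow⟩ := pv_inner_br sources limit r sources 0 c false rfl hc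
        (by simpa [pvRow] using hbr)
      rw [← pv_mix_zero sources r]
      have hlen1 : 1 ≤ (pvRow sources r).length := by omega
      have hemp : pvRow sources r ≠ [] := by
        intro hx
        rw [hx] at hlen1
        simp at hlen1
      have htklen : (limit.toNat - c.length) ≤ (pvRow sources r).length := by omega
      have hstoplen : limit ≤ ((c ++ (pvRow sources r).take (limit.toNat - c.length)).length : Int) := by
        simp [List.length_take, Nat.min_eq_left htklen]
        omega
      rw [pvOuter]
      simp only [if_pos hc, hrow, Bool.not_true]
      have hf1 : 1 ≤ fuel := by omega
      simp only [pvRow] at hstoplen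
      rw [if_neg (by simp), pv_outer_stop sources limit fuel _ ind' hf1 hstoplen]
      rw [pv_flat_cons sources r hemp, List.take_append]
      have h0 : limit.toNat - c.length - (pvRow sources r).length = 0 := by omega
      rw [h0]
      simp [pvRow]

-- ===== B-side: the stable sort by rank is the round-major bucket concatenation =====

-- bucket concatenation: bucket r holds the elements tagged with rank r, in list order
def pvBuck (m : Nat) (L : List (Int × PvR)) : List (Int × PvR) :=
  (List.range m).flatMap (fun (r : Nat) => L.filter (fun t => t.1 == (r : Int)))

lemma pv_insertBy_append (before : (Int × PvR) → (Int × PvR) → Bool) (x : Int × PvR)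
    (A B : List (Int × PvR)) (hA : ∀ a ∈ A, before x a = false)
    (hB : ∀ hd ∈ B.head?, before x hd = true) :
    PySem.List.insertBy before x (A ++ B) = A ++ x :: B := by
  induction A with
  | nil =>
    cases B with
    | nil => simp [PySem.List.insertBy]
    | cons b bs =>
      have hb : before x b = true := hB b (by simp)
      simp [PySem.List.insertBy, hb]
  | cons a A ih =>
    have ha : before x a = false := hA a (by simp)
    simp only [List.cons_append, PySem.List.insertBy, ha]
    simp [ih (fun a' ha' => hA a' (by simp [ha']))]

lemma pv_insert_buck (m : Nat) (L : List (Int × PvR)) (x : Int × PvR)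
    (hx0 : 0 ≤ x.1) (hxm : x.1 < (m : Int)) :
    PySem.List.insertBy (fun a b => decide (a.1 < b.1)) x (pvBuck m L) = pvBuck m (L ++ [x]) := by
  set k := x.1.toNat with hk
  have hkx : (k : Int) = x.1 := by omega
  have hkm : k < m := by omega
  have hsplit : List.range m = (List.range k ++ [k]) ++ List.range' (k + 1) (m - (k + 1)) := by
    have h1 : List.range m = List.range ((k + 1) + (m - (k + 1))) := by
      congr 1
      omega
    rw [h1, List.range_add, ← List.range_succ]
    congr 1
    rw [List.range'_eq_map_range]
  have hbuckL : ∀ (Q : List (Int × PvR)),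
      pvBuck m Q = ((List.range k).flatMap (fun (r : Nat) => Q.filter (fun t => t.1 == (r : Int)))
          ++ Q.filter (fun t => t.1 == (k : Int)))
        ++ (List.range' (k + 1) (m - (k + 1))).flatMap (fun (r : Nat) => Q.filter (fun t => t.1 == (r : Int))) := by
    intro Q
    rw [pvBuck, hsplit, List.flatMap_append, List.flatMap_append]
    simp
  -- left part: keys ≤ x.1; right part: keys > x.1
  have hA : ∀ a ∈ (List.range k).flatMap (fun (r : Nat) => L.filter (fun t => t.1 == (r : Int)))
      ++ L.filter (fun t => t.1 == (k : Int)), (decide (x.1 < a.1)) = false := by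
    intro a ha
    rcases List.mem_append.mp ha with h | h
    · obtain ⟨r, hr, hfa⟩ := List.mem_flatMap.mp h
      have := (List.mem_filter.mp hfa).2
      have ha1 : a.1 = (r : Int) := by simpa using this
      have hrk : r < k := List.mem_range.mp hr
      simp [ha1]
      omega
    · have := (List.mem_filter.mp h).2
      have ha1 : a.1 = (k : Int) := by simpa using this
      simp [ha1]
      omega
  have hB : ∀ hd ∈ ((List.range' (k + 1) (m - (k + 1))).flatMap
      (fun (r : Nat) => L.filter (fun t => t.1 == (r : Int)))).head?, (decide (x.1 < hd.1)) = true := by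
    intro hd hhd
    have hmem := List.mem_of_mem_head? hhd
    obtain ⟨r, hr, hfa⟩ := List.mem_flatMap.mp hmem
    have := (List.mem_filter.mp hfa).2
    have ha1 : hd.1 = (r : Int) := by simpa using this
    have hkr : k + 1 ≤ r := (List.mem_range'_1.mp hr).1
    simp [ha1]
    omega
  rw [hbuckL L, pv_insertBy_append _ x _ _ hA hB]
  -- now compute the bucket decomposition of L ++ [x]
  rw [hbuckL (L ++ [x])]
  have hfcons : ∀ (r : Nat), (r : Int) ≠ x.1 →
      (L ++ [x]).filter (fun t => t.1 == (r : Int)) = L.filter (fun t => t.1 == (r : Int)) := by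
    intro r hne
    rw [List.filter_append]
    have hx : (x.1 == (r : Int)) = false := by
      simp
      omega
    simp [hx]
  have h1 : (List.range k).flatMap (fun (r : Nat) => (L ++ [x]).filter (fun t => t.1 == (r : Int)))
      = (List.range k).flatMap (fun (r : Nat) => L.filter (fun t => t.1 == (r : Int))) := by
    apply List.flatMap_congr
    intro r hr
    exact hfcons r (by have := List.mem_range.mp hr; omega)
  have h2 : (L ++ [x]).filter (fun t => t.1 == (k : Int))
      = L.filter (fun t => t.1 == (k : Int)) ++ [x] := by
    rw [List.filter_append]
    have hx : (x.1 == (k : Int)) = true := by simp; omega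
    simp [hx]
  have h3 : (List.range' (k + 1) (m - (k + 1))).flatMap (fun (r : Nat) => (L ++ [x]).filter (fun t => t.1 == (r : Int)))
      = (List.range' (k + 1) (m - (k + 1))).flatMap (fun (r : Nat) => L.filter (fun t => t.1 == (r : Int))) := by
    apply List.flatMap_congr
    intro r hr
    exact hfcons r (by have := (List.mem_range'_1.mp hr).1; omega)
  rw [h1, h2, h3]
  simp

lemma pv_sorted_buck (m : Nat) (L : List (Int × PvR))
    (hL : ∀ t ∈ L, 0 ≤ t.1 ∧ t.1 < (m : Int)) :
    PySem.List.sorted L (fun t => t.1) false = pvBuck m L := by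
  rw [PySem.List.sorted_eq_foldl_insertBy]
  have hinv : ∀ (suffix P : List (Int × PvR)), (∀ t ∈ suffix, 0 ≤ t.1 ∧ t.1 < (m : Int)) →
      suffix.foldl (fun acc x => PySem.List.insertBy (fun a b => decide (a.1 < b.1)) x acc) (pvBuck m P)
        = pvBuck m (P ++ suffix) := by
    intro suffix
    induction suffix with
    | nil => intro P _; simp
    | cons x xs ih =>
      intro P hb
      have hx := hb x (by simp)
      rw [List.foldl_cons, pv_insert_buck m P x hx.1 hx.2,
        ih (P ++ [x]) (fun t ht => hb t (by simp [ht]))]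
      simp
  have h0 : pvBuck m ([] : List (Int × PvR)) = [] := by simp [pvBuck]
  have := hinv L [] hL
  rw [h0] at this
  simpa using this

lemma pv_filter_enum_lt (s : List PvR) :
    ∀ (start r : Int), r < start →
      (PySem.List.enumerate s start).filter (fun t => t.1 == r) = [] := by
  induction s with
  | nil => intro start r _; simp [PySem.List.enumerate]
  | cons x xs ih =>
    intro start r hr
    rw [PySem.List.enumerate_cons, List.filter_cons]
    have : ((start, x).1 == r) = false := by simp; omega
    rw [this]
    exact ih (start + 1) r (by omega)

lemma pv_filter_enum (s : List PvR) :
    ∀ (k : Nat) (start : Int),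
      (PySem.List.enumerate s start).filter (fun t => t.1 == start + (k : Int))
        = (s[k]?).toList.map (fun it => (start + (k : Int), it)) := by
  induction s with
  | nil => intro k start; simp [PySem.List.enumerate]
  | cons x xs ih =>
    intro k start
    rw [PySem.List.enumerate_cons, List.filter_cons]
    cases k with
    | zero =>
      have hhd : ((start, x).1 == start + ((0 : Nat) : Int)) = true := by simp
      rw [hhd]
      rw [pv_filter_enum_lt xs (start + 1) (start + ((0 : Nat) : Int)) (by simp)]
      simp
    | succ k' =>
      have hhd : ((start, x).1 == start + ((k' + 1 : Nat) : Int)) = false := by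
        simp; omega
      rw [hhd]
      have := ih k' (start + 1)
      rw [show start + 1 + (k' : Int) = start + ((k' + 1 : Nat) : Int) from by push_cast; ring] at this
      rw [this]
      simp

lemma pv_filterMap_eq_flatMap (sources : List (List PvR)) (r : Nat) :
    sources.flatMap (fun s => (s[r]?).toList) = sources.filterMap (fun s => s[r]?) := by
  induction sources with
  | nil => simp
  | cons s ss ih =>
    rw [List.flatMap_cons, List.filterMap_cons, ih]
    cases h : s[r]? with
    | none => simp [h]
    | some v => simp [h]

lemma pv_buck_map_snd (sources : List (List PvR)) (r : Nat) :
    ((sources.flatMap (fun items => PySem.List.enumerate items)).filter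
        (fun t => t.1 == (r : Int))).map (fun t => t.2) = pvRow sources r := by
  rw [List.filter_flatMap, List.map_flatMap]
  rw [pvRow, ← pv_filterMap_eq_flatMap]
  apply List.flatMap_congr
  intro s _
  have := pv_filter_enum s r 0
  rw [show (0 : Int) + (r : Int) = (r : Int) from by ring] at this
  rw [this, List.map_map]
  simp

lemma pv_tagged_bounds (sources : List (List PvR)) (t : Int × PvR)
    (ht : t ∈ sources.flatMap (fun items => PySem.List.enumerate items)) :
    0 ≤ t.1 ∧ t.1 < (pvMax sources : Int) := by
  obtain ⟨s, hs, hmem⟩ := List.mem_flatMap.mp ht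
  obtain ⟨k, hk, hteq⟩ := (PySem.List.mem_enumerate_iff _ _ _).mp hmem
  have hlen := pv_le_max sources s hs
  subst hteq
  simp
  omega

lemma pv_alt_eq (sources : List (List PvR)) (limit : Int) :
    combine_ranked_lists_py_alt sources limit = (pvFlat sources 0).take (max limit 0).toNat := by
  by_cases hl : limit ≤ 0
  · have : (max limit 0).toNat = 0 := by omega
    simp [combine_ranked_lists_py_alt, hl, this]
  · rw [combine_ranked_lists_py_alt, if_neg hl]
    have hmax : (max limit 0).toNat = limit.toNat := by omega
    rw [hmax]
    rw [pv_sorted_buck (pvMax sources) _ (fun t ht => pv_tagged_bounds sources t ht)]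
    rw [List.map_take]
    congr 1
    rw [pvBuck, List.map_flatMap]
    rw [pvFlat, Nat.sub_zero, ← List.range_eq_range']
    apply List.flatMap_congr
    intro r _
    exact pv_buck_map_snd sources r

-- ===== VERDICT (by name: the statement is the Claim_ definition above) =====
theorem combine_ranked_lists_py_spec : Claim_equal_combine_ranked_lists_py := by
  intro sources limit _
  unfold Spec_combine_ranked_lists_py
  rw [combine_ranked_lists_py, pv_alt_eq]
  by_cases hl : 0 < limit
  · have hrep : List.replicate sources.length 0 = sources.map (fun s => min 0 s.length) := by
      simp [List.map_const']
    rw [hrep]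
    have := pv_outer_spec sources limit (limit.toNat + 2) 0 [] (by simpa using hl) (by simp)
    rw [this]
    have hmax : (max limit 0).toNat = limit.toNat := by omega
    simp [hmax]
  · have h2 : limit.toNat + 2 = (limit.toNat + 1) + 1 := rfl
    rw [h2, pvOuter]
    have hmax : (max limit 0).toNat = 0 := by omega
    simp [hmax, not_lt.mp (by simpa using hl)]
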